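-- pv_equiv track=rewrite | github.com/JackeyLove1/DeepClaw | books/coding-puzzles/solve2.py | numberOfEdgesAdded
-- ===== SOURCE A (Python) =====
-- from typing import List
--
-- def numberOfEdgesAdded(n: int, edges: List[List[int]]) -> int:
--     parent = list(range(n))
--     rank = [0] * n
--     xor = [0] * n  # parity to root
--
--     def find(x):
--         if parent[x] != x:
--             root = find(parent[x])
--             xor[x] ^= xor[parent[x]]
--             parent[x] = root
--         return parent[x]
--
--     ans = 0
--     for u, v, w in edges:
--         ru, rv = find(u), find(v)
--         pu, pv = xor[u], xor[v]
--         if ru == rv: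
--             # same component: accept if existing path parity matches w
--             if (pu ^ pv) == w:
--                 ans += 1
--         else:
--             # different components: always merge
--             if rank[ru] < rank[rv]:
--                 ru, rv = rv, ru
--                 pu, pv = pv, pu
--             parent[rv] = ru
--             xor[rv] = pu ^ pv ^ w
--             if rank[ru] == rank[rv]:
--                 rank[ru] += 1
--             ans += 1
--     return ans
-- ===== SOURCE B (Python) =====
-- from typing import List
--
-- def numberOfEdgesAdded(n: int, edges: List[List[int]]) -> int:
--     # quick-find with parity: comp[x] is x's representative, par[x] its parity
--     # to the representative; a union relabels the whole absorbed class eagerly,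
--     # so there is no find recursion and no path compression at all.
--     comp = list(range(n))
--     par = [0] * n
--     rank = [0] * n
--     ans = 0
--     for u, v, w in edges:
--         ru, rv = comp[u], comp[v]
--         if ru == rv:
--             if (par[u] ^ par[v]) == w:
--                 ans += 1
--         else:
--             if rank[ru] < rank[rv]:
--                 ru, rv = rv, ru
--             d = par[u] ^ par[v] ^ w
--             for x in range(n):
--                 if comp[x] == rv:
--                     comp[x] = ru
--                     par[x] ^= d
--             if rank[ru] == rank[rv]:
--                 rank[ru] += 1
--             ans += 1
--     return ans
-- ===== Notes on version B (the rewrite author's own statement) =====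
-- stated objective: alternative
-- what changed: B replaces the forest-based union-find (recursive find with path compression) by an eager quick-find: comp[x]/par[x] always hold each node's representative and parity directly, lookups are O(1) array reads, and a union relabels the absorbed class with one pass over range(n), so there is no find function and no compression at all.
import Mathlib
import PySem

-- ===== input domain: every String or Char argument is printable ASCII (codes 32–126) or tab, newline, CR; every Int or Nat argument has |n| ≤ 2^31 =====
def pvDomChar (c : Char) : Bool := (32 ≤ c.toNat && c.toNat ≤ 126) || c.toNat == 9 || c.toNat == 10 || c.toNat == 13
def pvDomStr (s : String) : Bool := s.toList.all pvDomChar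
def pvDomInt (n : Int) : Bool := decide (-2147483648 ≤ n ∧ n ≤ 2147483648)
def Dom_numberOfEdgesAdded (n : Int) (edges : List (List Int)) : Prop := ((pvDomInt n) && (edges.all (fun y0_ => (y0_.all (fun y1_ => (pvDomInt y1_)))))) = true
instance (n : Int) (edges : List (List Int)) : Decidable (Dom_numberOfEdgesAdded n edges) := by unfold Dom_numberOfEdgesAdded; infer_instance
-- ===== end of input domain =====

-- B replaces A's forest union-find (recursive find with path compression, union by rank) by
-- an eager quick-find: comp/par hold every node's representative and parity directly and a
-- union relabels the absorbed class in one pass; equality of the returned count is proved on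
-- Pre_.  Both Pythons mutate only their own local lists, so no caller-visible side effects.


-- shared Python-primitive shorthands: xs[i] read / write (wrapping negative indices, exact
-- under Pre_'s in-range condition, as in Python)
def pvGet (xs : List Int) (i : Int) : Int := PySem.List.pyGetD xs i 0
def pvSet (xs : List Int) (i : Int) (v : Int) : List Int := PySem.List.pySetD xs i v

-- ===== PORT A =====
-- recursive `find` with path compression; the Nat argument is a fuel bound making the
-- recursion structural (under Pre_ the parent forest is acyclic, so the chosen fuel is
-- never exhausted; at fuel 0 we return parent[x] without compressing, exactly the read
-- `return parent[x]` performs)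
def findA : Nat → List Int → List Int → Int → Int × List Int × List Int
  | 0, parent, xr, x => (pvGet parent x, parent, xr)
  | f+1, parent, xr, x =>
      if pvGet parent x = x then (pvGet parent x, parent, xr)
      else
        match findA f parent xr (pvGet parent x) with
        | (root, p1, x1) =>
          (root, pvSet p1 x root,
           pvSet x1 x (Int.xor (pvGet x1 x) (pvGet x1 (pvGet parent x))))

-- one edge [u, v, w] of A's loop; state = (parent, rank, xor, ans); a malformed row
-- (length ≠ 3) raises ValueError in Python and is excluded by Pre_
def stepA (F : Nat) (st : List Int × List Int × List Int × Int) (e : List Int) :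
    List Int × List Int × List Int × Int :=
  match e with
  | [u, v, w] =>
    match st with
    | (parent, rank, xr, ans) =>
      match findA F parent xr u with
      | (ru, p1, x1) =>
        match findA F p1 x1 v with
        | (rv, p2, x2) =>
          let pu := pvGet x2 u
          let pv := pvGet x2 v
          if ru = rv then
            if Int.xor pu pv = w then (p2, rank, x2, ans + 1) else (p2, rank, x2, ans)
          else
            match (if pvGet rank ru < pvGet rank rv then (rv, ru, pv, pu) else (ru, rv, pu, pv)) with
            | (ru', rv', pu', pv') =>
              let p3 := pvSet p2 rv' ru'
              let x3 := pvSet x2 rv' (Int.xor (Int.xor pu' pv') w)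
              let rank' := if pvGet rank ru' = pvGet rank rv'
                           then pvSet rank ru' (pvGet rank ru' + 1) else rank
              (p3, rank', x3, ans + 1)
  | _ => st

def numberOfEdgesAdded (n : Int) (edges : List (List Int)) : Int :=
  (edges.foldl (stepA (n.toNat + edges.length))
    (PySem.List.pyRange 0 n 1, List.replicate n.toNat 0, List.replicate n.toNat 0, 0)).2.2.2

-- ===== PORT B =====
-- one iteration of B's relabelling pass (`for x in range(n): if comp[x] == rv: ...`)
def unionStep (ru rv d : Int) (cp : List Int × List Int) (x : Int) : List Int × List Int :=
  if pvGet cp.1 x = rv then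
    (pvSet cp.1 x ru, pvSet cp.2 x (Int.xor (pvGet cp.2 x) d))
  else cp

-- one edge of B's loop; state = (comp, par, rank, ans): comp[x] is x's representative and
-- par[x] its parity to the representative, kept exact at all times (quick-find)
def stepB (n : Int) (st : List Int × List Int × List Int × Int) (e : List Int) :
    List Int × List Int × List Int × Int :=
  match e with
  | [u, v, w] =>
    match st with
    | (comp, par, rank, ans) =>
      let ru := pvGet comp u
      let rv := pvGet comp v
      if ru = rv then
        if Int.xor (pvGet par u) (pvGet par v) = w then (comp, par, rank, ans + 1)
        else (comp, par, rank, ans)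
      else
        match (if pvGet rank ru < pvGet rank rv then (rv, ru) else (ru, rv)) with
        | (ru', rv') =>
          let d := Int.xor (Int.xor (pvGet par u) (pvGet par v)) w
          match (PySem.List.pyRange 0 n 1).foldl (unionStep ru' rv' d) (comp, par) with
          | (comp', par') =>
            let rank' := if pvGet rank ru' = pvGet rank rv'
                         then pvSet rank ru' (pvGet rank ru' + 1) else rank
            (comp', par', rank', ans + 1)
  | _ => st

def numberOfEdgesAdded_alt (n : Int) (edges : List (List Int)) : Int :=
  (edges.foldl (stepB n)
    (PySem.List.pyRange 0 n 1, List.replicate n.toNat 0, List.replicate n.toNat 0, 0)).2.2.2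

-- ===== PRECONDITION & SPEC =====
-- Pre_: every edge row is exactly [u, v, w] with u and v valid (possibly negative, Python-
-- wrapping) indices into a list of length n; otherwise A raises ValueError or IndexError.
def preEdge (n : Int) (e : List Int) : Bool :=
  match e with
  | [u, v, _w] => decide (-n ≤ u) && decide (u < n) && decide (-n ≤ v) && decide (v < n)
  | _ => false

def Pre_numberOfEdgesAdded (n : Int) (edges : List (List Int)) : Prop :=
  edges.all (preEdge n) = true

instance (n : Int) (edges : List (List Int)) : Decidable (Pre_numberOfEdgesAdded n edges) := by
  unfold Pre_numberOfEdgesAdded; infer_instance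

def pvWitness_numberOfEdgesAdded : Int × List (List Int) :=
  (3, [[0, 1, 1], [1, 2, 1], [0, 2, 0], [0, 2, 1]])

def Spec_numberOfEdgesAdded (n : Int) (edges : List (List Int)) (out : Int) : Prop :=
  out = numberOfEdgesAdded_alt n edges
instance (n : Int) (edges : List (List Int)) (out : Int) :
    Decidable (Spec_numberOfEdgesAdded n edges out) := by
  unfold Spec_numberOfEdgesAdded; infer_instance

-- ===== CLAIM (what is proved, stated in full; the proofs are below) =====
def Claim_equal_numberOfEdgesAdded : Prop :=
  ∀ (n : Int) (edges : List (List Int)), Dom_numberOfEdgesAdded n edges →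
    Pre_numberOfEdgesAdded n edges →
    Spec_numberOfEdgesAdded n edges (numberOfEdgesAdded n edges)

-- ===== LEMMAS AND PROOFS =====

-- ---- low-level index bookkeeping ----

theorem pyIdx?_slot (n : Nat) (x : Int) (h1 : -(n:Int) ≤ x) (h2 : x < (n:Int)) :
    PySem.List.pyIdx? n x = some (if x < 0 then x + n else x).toNat := by
  unfold PySem.List.pyIdx?
  by_cases hx : 0 ≤ x
  · rw [if_pos hx, if_pos h2]
    simp only [if_neg (show ¬ x < 0 by omega)]
  · rw [if_neg hx, if_pos h1]
    simp only [if_pos (show x < 0 by omega)]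
    congr 1
    omega

theorem pvGet_eqn (xs : List Int) (x : Int) (h1 : -(xs.length:Int) ≤ x)
    (h2 : x < (xs.length:Int)) :
    pvGet xs x = (xs[(if x < 0 then x + xs.length else x).toNat]?).getD 0 := by
  unfold pvGet PySem.List.pyGetD PySem.List.pyGet?
  rw [pyIdx?_slot _ _ h1 h2]
  rfl

theorem pvSet_eqn (xs : List Int) (x v : Int) (h1 : -(xs.length:Int) ≤ x)
    (h2 : x < (xs.length:Int)) :
    pvSet xs x v = xs.set (if x < 0 then x + xs.length else x).toNat v := by
  unfold pvSet PySem.List.pySetD PySem.List.pySet?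
  rw [pyIdx?_slot _ _ h1 h2]
  rfl

theorem length_pvSet (xs : List Int) (i v : Int) : (pvSet xs i v).length = xs.length := by
  unfold pvSet PySem.List.pySetD PySem.List.pySet?
  cases PySem.List.pyIdx? xs.length i <;> simp

theorem pvGet_wrap (xs : List Int) (x : Int) (h1 : -(xs.length:Int) ≤ x) (h2 : x < 0) :
    pvGet xs x = pvGet xs (x + xs.length) := by
  rw [pvGet_eqn xs x h1 (by omega), pvGet_eqn xs (x + xs.length) (by omega) (by omega)]
  simp only [if_pos h2, if_neg (show ¬ x + (xs.length:Int) < 0 by omega)]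

theorem pvSet_wrap (xs : List Int) (x v : Int) (h1 : -(xs.length:Int) ≤ x) (h2 : x < 0) :
    pvSet xs x v = pvSet xs (x + xs.length) v := by
  rw [pvSet_eqn xs x v h1 (by omega), pvSet_eqn xs (x + xs.length) v (by omega) (by omega)]
  simp only [if_pos h2, if_neg (show ¬ x + (xs.length:Int) < 0 by omega)]

theorem pvGet_pvSet (xs : List Int) (i j v : Int) (hi0 : 0 ≤ i) (hi : i < (xs.length:Int))
    (hj0 : 0 ≤ j) (hj : j < (xs.length:Int)) :
    pvGet (pvSet xs i v) j = if j = i then v else pvGet xs j := by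
  rw [pvSet_eqn xs i v (by omega) hi]
  rw [pvGet_eqn _ j (by simp; omega) (by simp; omega)]
  rw [pvGet_eqn xs j (by omega) hj]
  simp only [if_neg (not_lt.mpr hi0), if_neg (not_lt.mpr hj0), List.getElem?_set]
  by_cases hji : j = i
  · subst hji
    simp [show j.toNat < xs.length by omega]
  · rw [if_neg (show ¬ i.toNat = j.toNat by omega), if_neg hji]

theorem pvGet_pyRange (n j : Int) (h0 : 0 ≤ j) (h2 : j < n) :
    pvGet (PySem.List.pyRange 0 n 1) j = j := by
  have hmap : PySem.List.pyRange 0 n 1 = (PySem.List.pyRange 0 n 1).map id := by simp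
  unfold pvGet
  rw [hmap, PySem.List.pyGetD_map_pyRange_of_nonneg id n j 0 h0 h2]
  rfl

theorem pvGet_replicate (N : Nat) (j : Int) (h0 : 0 ≤ j) (h2 : j < (N:Int)) :
    pvGet (List.replicate N (0:Int)) j = 0 := by
  rw [pvGet_eqn _ j (by simp; omega) (by simp; omega)]
  rw [if_neg (not_lt.mpr h0)]
  rw [List.getElem?_replicate]
  rw [if_pos (show j.toNat < N by omega)]
  rfl

-- ---- xor bookkeeping ----

theorem intXor_comm (a b : Int) : Int.xor a b = Int.xor b a := by
  unfold Int.xor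
  cases a <;> cases b <;> simp [Nat.xor_comm]

theorem intXor_zero (a : Int) : Int.xor a 0 = a := by
  show Int.xor a (Int.ofNat 0) = a
  cases a <;> simp [Int.xor]

theorem intZero_xor (a : Int) : Int.xor 0 a = a := by
  rw [intXor_comm]
  exact intXor_zero a

theorem intXor_assoc (a b c : Int) :
    Int.xor (Int.xor a b) c = Int.xor a (Int.xor b c) := by
  cases a <;> cases b <;> cases c <;> simp [Int.xor, Nat.xor_assoc]

-- ---- the semantic view of a parent/xor forest: chains, roots, parities ----

def iterN (p : List Int) : Nat → Int → Int
  | 0, x => x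
  | d+1, x => iterN p d (pvGet p x)

def parN (p xr : List Int) : Nat → Int → Int
  | 0, x => pvGet xr x
  | d+1, x => Int.xor (pvGet xr x) (parN p xr d (pvGet p x))

def Reach (p : List Int) (d : Nat) (x : Int) : Prop :=
  pvGet p (iterN p d x) = iterN p d x

-- invariant of A's state: lengths, parent values in range, xor zero at every root
def InvA (N : Nat) (p xr : List Int) : Prop :=
  p.length = N ∧ xr.length = N ∧
  (∀ j : Int, 0 ≤ j → j < (N:Int) → 0 ≤ pvGet p j ∧ pvGet p j < (N:Int)) ∧
  (∀ j : Int, 0 ≤ j → j < (N:Int) → pvGet p j = j → pvGet xr j = 0)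

-- every node's chain reaches its root within c steps
def DepthLe (N : Nat) (p : List Int) (c : Nat) : Prop :=
  ∀ j : Int, 0 ≤ j → j < (N:Int) → Reach p c j

-- B's flat arrays track A's forest: comp[j] is j's root, par[j] its parity to the root
def RelB (N : Nat) (p xr comp par : List Int) : Prop :=
  comp.length = N ∧ par.length = N ∧
  ∀ j : Int, 0 ≤ j → j < (N:Int) → ∀ d : Nat, Reach p d j →
    pvGet comp j = iterN p d j ∧ pvGet par j = parN p xr d j

theorem iterN_succ (p : List Int) (d : Nat) (x : Int) :
    iterN p (d+1) x = iterN p d (pvGet p x) := rfl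

theorem parN_succ (p xr : List Int) (d : Nat) (x : Int) :
    parN p xr (d+1) x = Int.xor (pvGet xr x) (parN p xr d (pvGet p x)) := rfl

theorem iterN_zero (p : List Int) (x : Int) : iterN p 0 x = x := rfl

theorem parN_zero (p xr : List Int) (x : Int) : parN p xr 0 x = pvGet xr x := rfl

theorem iterN_add (p : List Int) (a b : Nat) (x : Int) :
    iterN p (a + b) x = iterN p b (iterN p a x) := by
  induction a generalizing x with
  | zero => simp [iterN]
  | succ a ih =>
      have h : a + 1 + b = (a + b) + 1 := by omega
      rw [h, iterN_succ, ih, iterN_succ]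

theorem iterN_fix (p : List Int) {r : Int} (h : pvGet p r = r) (d : Nat) :
    iterN p d r = r := by
  induction d with
  | zero => rfl
  | succ d ih => rw [iterN_succ, h]; exact ih

theorem reach_mono (p : List Int) {d e : Nat} {x : Int} (h : Reach p d x) (hde : d ≤ e) :
    iterN p e x = iterN p d x ∧ Reach p e x := by
  obtain ⟨k, rfl⟩ := Nat.exists_eq_add_of_le hde
  have h1 : iterN p k (iterN p d x) = iterN p d x := iterN_fix p h k
  constructor
  · rw [iterN_add, h1]
  · unfold Reach
    rw [iterN_add, h1]
    exact h

theorem reach_unique (p : List Int) {d e : Nat} {x : Int} (hd : Reach p d x)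
    (he : Reach p e x) : iterN p d x = iterN p e x := by
  rcases le_total d e with h | h
  · rw [(reach_mono p hd h).1]
  · rw [(reach_mono p he h).1]

theorem parN_fix (p xr : List Int) {r : Int} (hroot : pvGet p r = r)
    (hzero : pvGet xr r = 0) (d : Nat) : parN p xr d r = 0 := by
  induction d with
  | zero => exact hzero
  | succ d ih =>
      rw [parN_succ, hzero, hroot, ih]
      decide

theorem parN_succ_reach (p xr : List Int) : ∀ (d : Nat) (x : Int), Reach p d x →
    pvGet xr (iterN p d x) = 0 → parN p xr (d+1) x = parN p xr d x := by
  intro d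
  induction d with
  | zero =>
      intro x h hz
      unfold Reach at h
      simp only [iterN] at h hz
      rw [parN_succ p xr 0 x, h]
      show Int.xor (pvGet xr x) (pvGet xr x) = pvGet xr x
      rw [hz]
      decide
  | succ d ih =>
      intro x h hz
      have h' : Reach p d (pvGet p x) := h
      have hz' : pvGet xr (iterN p d (pvGet p x)) = 0 := hz
      rw [parN_succ p xr (d+1) x, parN_succ p xr d x, ih (pvGet p x) h' hz']

theorem parN_mono (p xr : List Int) {d e : Nat} {x : Int} (h : Reach p d x)
    (hz : pvGet xr (iterN p d x) = 0) (hde : d ≤ e) :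
    parN p xr e x = parN p xr d x := by
  induction e with
  | zero =>
      have : d = 0 := by omega
      subst this; rfl
  | succ e ih =>
      rcases Nat.lt_or_ge d (e+1) with hlt | hge
      · have hde' : d ≤ e := by omega
        have h1 := ih hde'
        have h2 := reach_mono p h hde'
        rw [parN_succ_reach p xr e x h2.2 (by rw [h2.1]; exact hz), h1]
      · have : d = e + 1 := by omega
        subst this; rfl

theorem par_unique (p xr : List Int) {d e : Nat} {x : Int} (hd : Reach p d x)
    (he : Reach p e x) (hz : pvGet xr (iterN p d x) = 0) :
    parN p xr d x = parN p xr e x := by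
  rcases le_total d e with h | h
  · rw [parN_mono p xr hd hz h]
  · rw [parN_mono p xr he (by rw [← reach_unique p hd he]; exact hz) h]

theorem iter_range (N : Nat) (p xr : List Int) (hI : InvA N p xr) :
    ∀ (d : Nat) (x : Int), 0 ≤ x → x < (N:Int) →
      0 ≤ iterN p d x ∧ iterN p d x < (N:Int) := by
  intro d
  induction d with
  | zero => intro x h0 h2; exact ⟨h0, h2⟩
  | succ d ih =>
      intro x h0 h2
      obtain ⟨hv0, hvN⟩ := hI.2.2.1 x h0 h2
      rw [iterN_succ]
      exact ih (pvGet p x) hv0 hvN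

theorem iterN_congr (N : Nat) (p q : List Int)
    (hpq : ∀ j : Int, 0 ≤ j → j < (N:Int) → pvGet p j = pvGet q j)
    (hr : ∀ j : Int, 0 ≤ j → j < (N:Int) → 0 ≤ pvGet p j ∧ pvGet p j < (N:Int)) :
    ∀ (d : Nat) (x : Int), 0 ≤ x → x < (N:Int) → iterN p d x = iterN q d x := by
  intro d
  induction d with
  | zero => intro x _ _; rfl
  | succ d ih =>
      intro x h0 h2
      rw [iterN_succ, iterN_succ, ← hpq x h0 h2]
      exact ih (pvGet p x) (hr x h0 h2).1 (hr x h0 h2).2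

theorem parN_congr (N : Nat) (p q xr yr : List Int)
    (hpq : ∀ j : Int, 0 ≤ j → j < (N:Int) → pvGet p j = pvGet q j)
    (hxy : ∀ j : Int, 0 ≤ j → j < (N:Int) → pvGet xr j = pvGet yr j)
    (hr : ∀ j : Int, 0 ≤ j → j < (N:Int) → 0 ≤ pvGet p j ∧ pvGet p j < (N:Int)) :
    ∀ (d : Nat) (x : Int), 0 ≤ x → x < (N:Int) → parN p xr d x = parN q yr d x := by
  intro d
  induction d with
  | zero => intro x h0 h2; exact hxy x h0 h2
  | succ d ih =>
      intro x h0 h2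
      rw [parN_succ, parN_succ, ← hpq x h0 h2, hxy x h0 h2]
      rw [ih (pvGet p x) (hr x h0 h2).1 (hr x h0 h2).2]

theorem iterN_wrap (p : List Int) (x : Int) (h1 : -(p.length:Int) ≤ x) (h2 : x < 0) :
    ∀ d : Nat, iterN p (d+1) x = iterN p (d+1) (x + p.length) := by
  intro d
  rw [iterN_succ, iterN_succ, ← pvGet_wrap p x h1 h2]

theorem parN_wrap (p xr : List Int) (x : Int) (hlen : xr.length = p.length)
    (h1 : -(p.length:Int) ≤ x) (h2 : x < 0) :
    ∀ d : Nat, parN p xr d x = parN p xr d (x + p.length) := by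
  intro d
  cases d with
  | zero =>
      show pvGet xr x = pvGet xr (x + (p.length:Int))
      rw [pvGet_wrap xr x (by omega) h2, hlen]
  | succ d =>
      rw [parN_succ, parN_succ, ← pvGet_wrap p x h1 h2]
      have : pvGet xr x = pvGet xr (x + (p.length:Int)) := by
        rw [pvGet_wrap xr x (by omega) h2, hlen]
      rw [this]

theorem cycle_fix (p : List Int) {d c : Nat} {x : Int} (h : Reach p d x) (hc : 0 < c)
    (hcyc : iterN p c x = x) : pvGet p x = x := by
  have hm : ∀ m : Nat, iterN p (m * c) x = x := by
    intro m
    induction m with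
    | zero => rw [Nat.zero_mul]; exact iterN_zero p x
    | succ m ih =>
        have hmc : (m + 1) * c = m * c + c := by ring
        rw [hmc, iterN_add, ih, hcyc]
  have hd : d ≤ d * c + 0 ∨ True := Or.inr trivial
  have hle : d ≤ d * c := Nat.le_mul_of_pos_right d hc
  have h1 := (reach_mono p h hle).1
  have h2 := hm d
  -- iterN p (d*c) x = iterN p d x and = x, so x is the root
  have : iterN p d x = x := by rw [← h1, h2]
  rw [← this]
  exact h

-- if each node's comp/par matches the forest at SOME sufficient depth, it matches at all
theorem rel_of_exists (N : Nat) (p xr comp par : List Int) (hI : InvA N p xr)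
    (hlen1 : comp.length = N) (hlen2 : par.length = N)
    (h : ∀ j : Int, 0 ≤ j → j < (N:Int) → ∃ d : Nat, Reach p d j ∧
        pvGet comp j = iterN p d j ∧ pvGet par j = parN p xr d j) :
    RelB N p xr comp par := by
  refine ⟨hlen1, hlen2, ?_⟩
  intro j h0 h2 d hd
  obtain ⟨d0, hd0, hc, hp⟩ := h j h0 h2
  have hiter := reach_unique p hd0 hd
  have hz : pvGet xr (iterN p d0 j) = 0 := by
    obtain ⟨hr0, hrN⟩ := iter_range N p xr hI d0 j h0 h2
    exact hI.2.2.2 _ hr0 hrN hd0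
  have hpar := par_unique p xr hd0 hd hz
  exact ⟨by rw [hc, hiter], by rw [hp, hpar]⟩

-- ---- semantics of one path-compression write: parent[s] := r, xor[s] := parity(s) ----

theorem compress_one (N : Nat) (p1 x1 : List Int) (hI1 : InvA N p1 x1) (s r nv : Int)
    (hs0 : 0 ≤ s) (hsN : s < (N:Int)) (hr0 : 0 ≤ r) (hrN : r < (N:Int))
    (hrr : pvGet p1 r = r) (hrs : r ≠ s)
    (d0 : Nat) (hd0 : Reach p1 d0 s) (hroot : iterN p1 d0 s = r)
    (hnv : nv = parN p1 x1 d0 s) :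
    ∀ (d : Nat) (j : Int), 0 ≤ j → j < (N:Int) → Reach p1 d j →
      ∃ d', d' ≤ d ∧ Reach (pvSet p1 s r) d' j ∧
        iterN (pvSet p1 s r) d' j = iterN p1 d j ∧
        parN (pvSet p1 s r) (pvSet x1 s nv) d' j = parN p1 x1 d j := by
  obtain ⟨hpl, hxl, hvals, hzero⟩ := hI1
  have hgp : ∀ j : Int, 0 ≤ j → j < (N:Int) →
      pvGet (pvSet p1 s r) j = if j = s then r else pvGet p1 j := by
    intro j h0 h2
    exact pvGet_pvSet p1 s j r hs0 (by omega) h0 (by omega)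
  have hgx : ∀ j : Int, 0 ≤ j → j < (N:Int) →
      pvGet (pvSet x1 s nv) j = if j = s then nv else pvGet x1 j := by
    intro j h0 h2
    exact pvGet_pvSet x1 s j nv hs0 (by omega) h0 (by omega)
  have hs_notroot : pvGet p1 s ≠ s := by
    intro hcon
    have := iterN_fix p1 hcon d0
    rw [this] at hroot
    exact hrs hroot.symm
  intro d
  induction d with
  | zero =>
      intro j h0 h2 hre
      have hj : pvGet p1 j = j := hre
      have hjs : j ≠ s := by
        intro hcon; subst hcon; exact hs_notroot hj
      refine ⟨0, le_refl _, ?_, ?_, ?_⟩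
      · show pvGet (pvSet p1 s r) j = j
        rw [hgp j h0 h2, if_neg hjs]; exact hj
      · rfl
      · show pvGet (pvSet x1 s nv) j = pvGet x1 j
        rw [hgx j h0 h2, if_neg hjs]
  | succ d ih =>
      intro j h0 h2 hre
      by_cases hjs : j = s
      · rw [hjs] at hre ⊢
        refine ⟨1, by omega, ?_, ?_, ?_⟩
        · show pvGet (pvSet p1 s r) (iterN (pvSet p1 s r) 1 s) = iterN (pvSet p1 s r) 1 s
          have h1 : iterN (pvSet p1 s r) 1 s = r := by
            show pvGet (pvSet p1 s r) s = r
            rw [hgp s hs0 hsN, if_pos rfl]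
          rw [h1, hgp r hr0 hrN, if_neg hrs]
          exact hrr
        · have h1 : iterN (pvSet p1 s r) 1 s = r := by
            show pvGet (pvSet p1 s r) s = r
            rw [hgp s hs0 hsN, if_pos rfl]
          rw [h1, reach_unique p1 hre hd0, hroot]
        · have h1 : pvGet (pvSet p1 s r) s = r := by
            rw [hgp s hs0 hsN, if_pos rfl]
          show Int.xor (pvGet (pvSet x1 s nv) s)
              (parN (pvSet p1 s r) (pvSet x1 s nv) 0 (pvGet (pvSet p1 s r) s)) =
            parN p1 x1 (d+1) s
          rw [h1, hgx s hs0 hsN, if_pos rfl]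
          have h2' : parN (pvSet p1 s r) (pvSet x1 s nv) 0 r = 0 := by
            show pvGet (pvSet x1 s nv) r = 0
            rw [hgx r hr0 hrN, if_neg hrs]
            exact hzero r hr0 hrN hrr
          rw [h2']
          have hz : pvGet x1 (iterN p1 d0 s) = 0 := by
            rw [hroot]; exact hzero r hr0 hrN hrr
          have hpu := par_unique p1 x1 hd0 hre hz
          rw [← hpu, ← hnv]
          exact intXor_zero nv
      · have hm0 : 0 ≤ pvGet p1 j := (hvals j h0 h2).1
        have hmN : pvGet p1 j < (N:Int) := (hvals j h0 h2).2
        have hrem : Reach p1 d (pvGet p1 j) := hre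
        obtain ⟨d2, hd2, hR2, hi2, hp2⟩ := ih (pvGet p1 j) hm0 hmN hrem
        have hstep : pvGet (pvSet p1 s r) j = pvGet p1 j := by
          rw [hgp j h0 h2, if_neg hjs]
        refine ⟨d2 + 1, by omega, ?_, ?_, ?_⟩
        · show Reach (pvSet p1 s r) (d2+1) j
          unfold Reach
          rw [iterN_succ, hstep]
          exact hR2
        · rw [iterN_succ, hstep, hi2, iterN_succ]
        · rw [parN_succ, hstep, hp2, parN_succ, hgx j h0 h2, if_neg hjs]

-- ---- the full characterisation of A's find ----

def FindPost (N : Nat) (p xr : List Int) (x : Int) (f : Nat)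
    (r : Int) (p' xr' : List Int) : Prop :=
  r = iterN p f x ∧
  InvA N p' xr' ∧
  (∀ j : Int, 0 ≤ j → j < (N:Int) → ∀ d : Nat, Reach p d j →
    ∃ d', d' ≤ d ∧ Reach p' d' j ∧ iterN p' d' j = iterN p d j ∧
      parN p' xr' d' j = parN p xr d j) ∧
  (∀ j : Int, 0 ≤ j → j < (N:Int) → pvGet p (pvGet p j) = pvGet p j →
    pvGet p' j = pvGet p j ∧ pvGet xr' j = pvGet xr j) ∧
  (∀ j : Int, 0 ≤ j → j < (N:Int) → (∀ k : Nat, iterN p k x ≠ j) → x + N ≠ j →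
    pvGet p' j = pvGet p j ∧ pvGet xr' j = pvGet xr j) ∧
  pvGet p' x = iterN p f x ∧
  pvGet xr' x = parN p xr f x

theorem find_sem (N : Nat) : ∀ (f : Nat) (p xr : List Int) (x : Int),
    InvA N p xr → -(N:Int) ≤ x → x < (N:Int) → Reach p f x →
    ∀ r p' xr', findA f p xr x = (r, p', xr') → FindPost N p xr x f r p' xr' := by
  intro f
  induction f with
  | zero =>
      intro p xr x hI hx1 hx2 hRe r p' xr' hEq
      obtain ⟨hpl, hxl, hvals, hzero⟩ := hI
      have hx0 : 0 ≤ x := by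
        by_contra hneg
        have hwrap : pvGet p x = pvGet p (x + p.length) := pvGet_wrap p x (by omega) (by omega)
        have : 0 ≤ pvGet p x := by
          rw [hwrap, hpl]
          exact (hvals (x + N) (by omega) (by omega)).1
        have hroot : pvGet p x = x := hRe
        omega
      have hroot : pvGet p x = x := hRe
      simp only [findA] at hEq
      obtain ⟨h1, h2, h3⟩ : pvGet p x = r ∧ p = p' ∧ xr = xr' := by
        injection hEq with ha hb
        injection hb with hb hc
        exact ⟨ha, hb, hc⟩
      subst h2; subst h3
      refine ⟨by rw [← h1, hroot, iterN_zero], ⟨hpl, hxl, hvals, hzero⟩, ?_, ?_, ?_, ?_, ?_⟩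
      · intro j h0 hN d hd
        exact ⟨d, le_refl _, hd, rfl, rfl⟩
      · intro j _ _ _; exact ⟨rfl, rfl⟩
      · intro j _ _ _ _; exact ⟨rfl, rfl⟩
      · exact hroot
      · show pvGet xr x = parN p xr 0 x
        rfl
  | succ f ih =>
      intro p xr x hI hx1 hx2 hRe r p' xr' hEq
      obtain ⟨hpl, hxl, hvals, hzero⟩ := hI
      by_cases hpx : pvGet p x = x
      · -- x is its own root: state unchanged
        have hx0 : 0 ≤ x := by
          by_contra hneg
          have hwrap : pvGet p x = pvGet p (x + p.length) := pvGet_wrap p x (by omega) (by omega)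
          have : 0 ≤ pvGet p x := by
            rw [hwrap, hpl]
            exact (hvals (x + N) (by omega) (by omega)).1
          omega
        simp only [findA, if_pos hpx] at hEq
        obtain ⟨h1, h2, h3⟩ : pvGet p x = r ∧ p = p' ∧ xr = xr' := by
          injection hEq with ha hb
          injection hb with hb hc
          exact ⟨ha, hb, hc⟩
        subst h2; subst h3
        have hfix : iterN p (f+1) x = x := iterN_fix p hpx (f+1)
        have hxz : pvGet xr x = 0 := hzero x hx0 hx2 hpx
        refine ⟨by rw [← h1, hpx, hfix], ⟨hpl, hxl, hvals, hzero⟩, ?_, ?_, ?_, ?_, ?_⟩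
        · intro j h0 hN d hd
          exact ⟨d, le_refl _, hd, rfl, rfl⟩
        · intro j _ _ _; exact ⟨rfl, rfl⟩
        · intro j _ _ _ _; exact ⟨rfl, rfl⟩
        · rw [hfix]; exact hpx
        · rw [parN_fix p xr hpx hxz]; exact hxz
      · -- follow the parent pointer
        set s : Int := if x < 0 then x + N else x with hs_def
        have hs0 : 0 ≤ s := by
          rw [hs_def]; split <;> omega
        have hsN : s < (N:Int) := by
          rw [hs_def]; split <;> omega
        have hgxs : ∀ xs : List Int, xs.length = N → pvGet xs x = pvGet xs s := by
          intro xs hlen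
          rw [hs_def]
          split
          · rw [pvGet_wrap xs x (by omega) (by assumption), hlen]
          · rfl
        have hsetxs : ∀ (xs : List Int) (v : Int), xs.length = N → pvSet xs x v = pvSet xs s v := by
          intro xs v hlen
          rw [hs_def]
          split
          · rw [pvSet_wrap xs x v (by omega) (by assumption), hlen]
          · rfl
        have hpxs : pvGet p x = pvGet p s := hgxs p hpl
        have hpx0 : 0 ≤ pvGet p x := by rw [hpxs]; exact (hvals s hs0 hsN).1
        have hpxN : pvGet p x < (N:Int) := by rw [hpxs]; exact (hvals s hs0 hsN).2
        have hRe' : Reach p f (pvGet p x) := hRe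
        -- chain of x after one step equals chain of s after one step
        have hchain : ∀ k : Nat, iterN p (k+1) x = iterN p (k+1) s := by
          intro k
          rw [iterN_succ, iterN_succ, hpxs]
        have hReS : Reach p (f+1) s := by
          unfold Reach
          rw [← hchain f]
          exact hRe
        simp only [findA, if_neg hpx] at hEq
        rcases hrec : findA f p xr (pvGet p x) with ⟨r0, p1, x1⟩
        rw [hrec] at hEq
        obtain ⟨h1, h2, h3⟩ : r0 = r ∧ pvSet p1 x r0 = p' ∧
            pvSet x1 x (Int.xor (pvGet x1 x) (pvGet x1 (pvGet p x))) = xr' := by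
          injection hEq with ha hb
          injection hb with hb hc
          exact ⟨ha, hb, hc⟩
        have hB1 := ih p xr (pvGet p x) ⟨hpl, hxl, hvals, hzero⟩ (by omega) hpxN hRe' r0 p1 x1 hrec
        obtain ⟨hB1r, hB1I, hB1pres, hB1dir, hB1un, hB1px, hB1pxr⟩ := hB1
        obtain ⟨hp1l, hx1l, hvals1, hzero1⟩ := hB1I
        have hr_eq : r0 = iterN p (f+1) x := by rw [hB1r, iterN_succ]
        have hroot_r : pvGet p r0 = r0 := by
          have : Reach p f (pvGet p x) := hRe'
          rw [hB1r]; exact this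
        have hr0' : 0 ≤ r0 ∧ r0 < (N:Int) := by
          rw [hB1r]; exact iter_range N p xr ⟨hpl, hxl, hvals, hzero⟩ f (pvGet p x) hpx0 hpxN
        have hp'len : p'.length = N := by rw [← h2, length_pvSet, hp1l]
        have hxr'len : xr'.length = N := by rw [← h3, length_pvSet, hx1l]
        by_cases hpxeq : pvGet p x = s
        · -- the slot of x is already its own root (possible only for negative x)
          have hsroot : pvGet p s = s := by rw [← hpxs]; exact hpxeq
          have hrec_id : findA f p xr (pvGet p x) = (s, p, xr) := by
            rw [hpxeq]
            cases f with
            | zero => simp [findA, hsroot]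
            | succ f => simp [findA, hsroot]
          rw [hrec_id] at hrec
          obtain ⟨e1, e2, e3⟩ : s = r0 ∧ p = p1 ∧ xr = x1 := by
            injection hrec with ha hb
            injection hb with hb hc
            exact ⟨ha, hb, hc⟩
          subst e2; subst e3
          have hxr_s : pvGet xr s = 0 := hzero s hs0 hsN hsroot
          have hiterfix : iterN p (f+1) x = s := by
            rw [iterN_succ, hpxeq, iterN_fix p hsroot]
          -- the two writes store back the values already present
          have hp'ptw : ∀ j : Int, 0 ≤ j → j < (N:Int) → pvGet p' j = pvGet p j := by
            intro j h0 hN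
            rw [← h2, ← e1, hsetxs p s hpl,
                pvGet_pvSet p s j s hs0 (by omega) h0 (by omega)]
            split
            · rename_i hj; rw [hj]; exact hsroot.symm
            · rfl
          have hxr'ptw : ∀ j : Int, 0 ≤ j → j < (N:Int) → pvGet xr' j = pvGet xr j := by
            intro j h0 hN
            rw [← h3, hsetxs xr _ hxl,
                pvGet_pvSet xr s j _ hs0 (by omega) h0 (by omega)]
            split
            · rename_i hj
              rw [hj, hgxs xr hxl, hpxeq, hxr_s]
              show Int.xor 0 0 = 0
              decide
            · rfl
          have hvals' : ∀ j : Int, 0 ≤ j → j < (N:Int) →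
              0 ≤ pvGet p' j ∧ pvGet p' j < (N:Int) := by
            intro j h0 hN; rw [hp'ptw j h0 hN]; exact hvals j h0 hN
          have hiter' : ∀ (d : Nat) (j : Int), 0 ≤ j → j < (N:Int) →
              iterN p' d j = iterN p d j := by
            intro d j h0 hN
            exact iterN_congr N p' p (fun j h0 hN => hp'ptw j h0 hN) hvals' d j h0 hN
          have hpar' : ∀ (d : Nat) (j : Int), 0 ≤ j → j < (N:Int) →
              parN p' xr' d j = parN p xr d j := by
            intro d j h0 hN
            exact parN_congr N p' p xr' xr (fun j h0 hN => hp'ptw j h0 hN)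
              (fun j h0 hN => hxr'ptw j h0 hN) hvals' d j h0 hN
          refine ⟨by rw [← h1, ← e1, hiterfix], ⟨hp'len, hxr'len, hvals', ?_⟩, ?_, ?_, ?_, ?_, ?_⟩
          · intro j h0 hN hroot'
            rw [hxr'ptw j h0 hN]
            exact hzero j h0 hN (by rw [← hp'ptw j h0 hN]; exact hroot')
          · intro j h0 hN d hd
            refine ⟨d, le_refl _, ?_, hiter' d j h0 hN, hpar' d j h0 hN⟩
            unfold Reach
            rw [hiter' d j h0 hN]
            obtain ⟨q0, qN⟩ := iter_range N p xr ⟨hpl, hxl, hvals, hzero⟩ d j h0 hN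
            rw [hp'ptw _ q0 qN]
            exact hd
          · intro j h0 hN _
            exact ⟨hp'ptw j h0 hN, hxr'ptw j h0 hN⟩
          · intro j h0 hN _ _
            exact ⟨hp'ptw j h0 hN, hxr'ptw j h0 hN⟩
          · rw [hgxs p' hp'len, hp'ptw s hs0 hsN, hsroot, hiterfix]
          · rw [hgxs xr' hxr'len, hxr'ptw s hs0 hsN, hxr_s, parN_succ, hpxeq,
                parN_fix p xr hsroot hxr_s, hgxs xr hxl, hxr_s]
            decide
        · -- genuine recursion: the slot of x is not a root
          have hs_nr : pvGet p s ≠ s := by rw [← hpxs]; exact hpxeq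
          have hsoff : ∀ k : Nat, iterN p k (pvGet p x) ≠ s := by
            intro k hcon
            have hcyc : iterN p (k+1) s = s := by
              rw [iterN_succ, ← hpxs]
              exact hcon
            exact hs_nr (cycle_fix p hReS (Nat.succ_pos k) hcyc)
          have hun_s := hB1un s hs0 hsN hsoff (by omega)
          have hx1x : pvGet x1 x = pvGet xr x := by
            rw [hgxs x1 hx1l, hgxs xr hxl]
            exact hun_s.2
          have hnv_def : Int.xor (pvGet x1 x) (pvGet x1 (pvGet p x)) = parN p xr (f+1) x := by
            rw [hx1x, hB1pxr, parN_succ]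
          -- the root r0 persists in p1
          obtain ⟨dr, hdr0, hRr, hIr, hPr⟩ := hB1pres r0 hr0'.1 hr0'.2 0 hroot_r
          have hdr : dr = 0 := Nat.le_zero.mp hdr0
          subst hdr
          have hp1r : pvGet p1 r0 = r0 := hRr
          have hr_ne_s : r0 ≠ s := by
            intro hcon
            rw [hcon] at hroot_r
            exact hs_nr hroot_r
          -- apply the find preservation at s with full depth
          obtain ⟨d0, hd0le, hd0R, hd0i, hd0p⟩ := hB1pres s hs0 hsN (f+1) hReS
          have hpar_xs : ∀ d : Nat, parN p xr d x = parN p xr d s := by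
            intro d
            rw [hs_def]
            split
            · have := parN_wrap p xr x (hxl.trans hpl.symm) (by omega) (by assumption) d
              rw [hpl] at this
              exact this
            · rfl
          have hd0i' : iterN p1 d0 s = r0 := by
            rw [hd0i, ← hchain f]
            exact hr_eq.symm
          have hnv_d0 : Int.xor (pvGet x1 x) (pvGet x1 (pvGet p x)) = parN p1 x1 d0 s := by
            rw [hnv_def, hpar_xs (f+1), ← hd0p]
          have hcomp := compress_one N p1 x1 ⟨hp1l, hx1l, hvals1, hzero1⟩ s r0 _
            hs0 hsN hr0'.1 hr0'.2 hp1r hr_ne_s d0 hd0R hd0i' hnv_d0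
          have hP2 : p' = pvSet p1 s r0 := by rw [← h2, hsetxs p1 r0 hp1l]
          have hX2 : xr' = pvSet x1 s (Int.xor (pvGet x1 x) (pvGet x1 (pvGet p x))) := by
            rw [← h3, hsetxs x1 _ hx1l]
          have hgp2 : ∀ j : Int, 0 ≤ j → j < (N:Int) →
              pvGet p' j = if j = s then r0 else pvGet p1 j := by
            intro j h0 hN
            rw [hP2]
            exact pvGet_pvSet p1 s j r0 hs0 (by omega) h0 (by omega)
          have hgx2 : ∀ j : Int, 0 ≤ j → j < (N:Int) →
              pvGet xr' j = if j = s then Int.xor (pvGet x1 x) (pvGet x1 (pvGet p x))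
                            else pvGet x1 j := by
            intro j h0 hN
            rw [hX2]
            exact pvGet_pvSet x1 s j _ hs0 (by omega) h0 (by omega)
          refine ⟨by rw [← h1, hr_eq], ⟨hp'len, hxr'len, ?_, ?_⟩, ?_, ?_, ?_, ?_, ?_⟩
          · -- values of the new parent list stay in range
            intro j h0 hN
            rw [hgp2 j h0 hN]
            split
            · exact hr0'
            · exact hvals1 j h0 hN
          · -- xor stays 0 at every root of the new parent list
            intro j h0 hN hroot'
            rw [hgp2 j h0 hN] at hroot'
            by_cases hjs : j = s
            · rw [if_pos hjs] at hroot'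
              exact absurd (hroot'.trans hjs) hr_ne_s
            · rw [if_neg hjs] at hroot'
              rw [hgx2 j h0 hN, if_neg hjs]
              exact hzero1 j h0 hN hroot'
          · -- semantic preservation, composing the recursion's with the final write's
            intro j h0 hN d hd
            obtain ⟨d1, hd1le, hd1R, hd1i, hd1p⟩ := hB1pres j h0 hN d hd
            obtain ⟨d2, hd2le, hd2R, hd2i, hd2p⟩ := hcomp d1 j h0 hN hd1R
            refine ⟨d2, le_trans hd2le hd1le, ?_, ?_, ?_⟩
            · rw [hP2]; exact hd2R
            · rw [hP2, hd2i, hd1i]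
            · rw [hP2, hX2, hd2p, hd1p]
          · -- nodes whose parent is already a root keep their two cells
            intro j h0 hN hdir
            by_cases hjs : j = s
            · subst hjs
              have hpxroot : pvGet p (pvGet p x) = pvGet p x := by
                rw [hpxs]; exact hdir
              have hr0px : r0 = pvGet p x := by
                rw [hB1r, iterN_fix p hpxroot]
              constructor
              · rw [hgp2 s hs0 hsN, if_pos rfl, hr0px, hpxs]
              · rw [hgx2 s hs0 hsN, if_pos rfl, hx1x, hB1pxr,
                    parN_fix p xr hpxroot (hzero _ hpx0 hpxN hpxroot), intXor_zero,
                    hgxs xr hxl]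
            · have hd1 := hB1dir j h0 hN hdir
              constructor
              · rw [hgp2 j h0 hN, if_neg hjs]; exact hd1.1
              · rw [hgx2 j h0 hN, if_neg hjs]; exact hd1.2
          · -- cells away from x's chain (and x's own slot) are untouched
            intro j h0 hN hks hxN
            have hjs : j ≠ s := by
              rw [hs_def]
              split
              · omega
              · exact fun hcon => hks 0 hcon.symm
            have hks' : ∀ k : Nat, iterN p k (pvGet p x) ≠ j := by
              intro k
              have := hks (k+1)
              rw [iterN_succ] at this
              exact this
            have hxx : pvGet p x + (N:Int) ≠ j := by omega
            have hu := hB1un j h0 hN hks' hxx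
            constructor
            · rw [hgp2 j h0 hN, if_neg hjs]; exact hu.1
            · rw [hgx2 j h0 hN, if_neg hjs]; exact hu.2
          · rw [hgxs p' hp'len, hgp2 s hs0 hsN, if_pos rfl, hr_eq]
          · rw [hgxs xr' hxr'len, hgx2 s hs0 hsN, if_pos rfl, hnv_def]

-- every admitted node index reaches its root within the fuel
theorem reach_any (N c : Nat) (p xr : List Int) (hI : InvA N p xr) (hD : DepthLe N p c)
    (F : Nat) (hcF : c + 1 ≤ F) (x : Int) (hx1 : -(N:Int) ≤ x) (hx2 : x < (N:Int)) :
    Reach p F x := by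
  by_cases hx0 : 0 ≤ x
  · exact (reach_mono p (hD x hx0 hx2) (by omega)).2
  · have hs := hD (x + N) (by omega) (by omega)
    have hw := iterN_wrap p x (by rw [hI.1]; omega) (by omega) c
    rw [hI.1] at hw
    have hmono := reach_mono p hs (Nat.le_succ c)
    have hre : Reach p (c+1) x := by
      unfold Reach
      rw [hw]
      exact hmono.2
    exact (reach_mono p hre (by omega)).2

-- evaluating roots and parities of a (possibly negative) node in a preserved state
theorem state_eval (N c F : Nat) (p xr p1 x1 comp par : List Int)
    (hI : InvA N p xr) (hI1 : InvA N p1 x1)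
    (hpres : ∀ j : Int, 0 ≤ j → j < (N:Int) → ∀ d : Nat, Reach p d j →
        ∃ d', d' ≤ d ∧ Reach p1 d' j ∧ iterN p1 d' j = iterN p d j ∧
          parN p1 x1 d' j = parN p xr d j)
    (hR : RelB N p xr comp par) (hD : DepthLe N p c) (hcF : c + 1 ≤ F)
    (x : Int) (hx1 : -(N:Int) ≤ x) (hx2 : x < (N:Int)) :
    Reach p1 F x ∧ iterN p1 F x = iterN p F x ∧ parN p1 x1 F x = parN p xr F x ∧
    pvGet comp x = iterN p F x ∧ pvGet par x = parN p xr F x ∧ Reach p F x := by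
  have hD1 : DepthLe N p1 c := by
    intro j h0 hN
    obtain ⟨d', hle, hRe, _, _⟩ := hpres j h0 hN c (hD j h0 hN)
    exact (reach_mono p1 hRe hle).2
  have hRF : Reach p F x := reach_any N c p xr hI hD F hcF x hx1 hx2
  have hRF1 : Reach p1 F x := reach_any N c p1 x1 hI1 hD1 F hcF x hx1 hx2
  set s : Int := if x < 0 then x + N else x with hs_def
  have hs0 : 0 ≤ s := by rw [hs_def]; split <;> omega
  have hsN : s < (N:Int) := by rw [hs_def]; split <;> omega
  obtain ⟨F0, rfl⟩ : ∃ F0, F = F0 + 1 := ⟨F - 1, by omega⟩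
  have hiter_xs : ∀ q : List Int, q.length = N → iterN q (F0+1) x = iterN q (F0+1) s := by
    intro q hlen
    rw [hs_def]
    split
    · have := iterN_wrap q x (by rw [hlen]; omega) (by assumption) F0
      rw [hlen] at this
      exact this
    · rfl
  have hpar_xs : ∀ (q yr : List Int), q.length = N → yr.length = N →
      parN q yr (F0+1) x = parN q yr (F0+1) s := by
    intro q yr hlen hylen
    rw [hs_def]
    split
    · have := parN_wrap q yr x (hylen.trans hlen.symm) (by rw [hlen]; omega) (by assumption) (F0+1)
      rw [hlen] at this
      exact this
    · rfl
  have hRcs : Reach p c s := hD s hs0 hsN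
  obtain ⟨d1, hd1le, hd1R, hd1i, hd1p⟩ := hpres s hs0 hsN c hRcs
  have hRFs : Reach p (F0+1) s := (reach_mono p hRcs (by omega)).2
  have hiF : iterN p (F0+1) s = iterN p c s := (reach_mono p hRcs (by omega)).1
  have hiF1 : iterN p1 (F0+1) s = iterN p c s := by
    rw [(reach_mono p1 hd1R (by omega)).1, hd1i]
  have hroot_range := iter_range N p xr hI c s hs0 hsN
  have hroot_r : pvGet p (iterN p c s) = iterN p c s := hRcs
  have hzp : pvGet xr (iterN p c s) = 0 :=
    hI.2.2.2 _ hroot_range.1 hroot_range.2 hroot_r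
  have hzp1 : pvGet x1 (iterN p1 d1 s) = 0 := by
    rw [hd1i]
    exact hI1.2.2.2 _ hroot_range.1 hroot_range.2 (by rw [← hd1i]; exact hd1R)
  have hparF1 : parN p1 x1 (F0+1) s = parN p xr (F0+1) s := by
    have e1 : parN p1 x1 (F0+1) s = parN p1 x1 d1 s := parN_mono p1 x1 hd1R hzp1 (by omega)
    have e2 : parN p xr (F0+1) s = parN p xr c s := parN_mono p xr hRcs hzp (by omega)
    rw [e1, hd1p, e2]
  refine ⟨hRF1, ?_, ?_, ?_, ?_, hRF⟩
  · rw [hiter_xs p1 hI1.1, hiter_xs p hI.1, hiF1, hiF]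
  · rw [hpar_xs p1 x1 hI1.1 hI1.2.1, hpar_xs p xr hI.1 hI.2.1, hparF1]
  · have hget : pvGet comp x = pvGet comp s := by
      rw [hs_def]
      split
      · rename_i hneg
        rw [pvGet_wrap comp x (by rw [hR.1]; omega) hneg, hR.1]
      · rfl
    rw [hget, (hR.2.2 s hs0 hsN (F0+1) hRFs).1, hiter_xs p hI.1]
  · have hget : pvGet par x = pvGet par s := by
      rw [hs_def]
      split
      · rename_i hneg
        rw [pvGet_wrap par x (by rw [hR.2.1]; omega) hneg, hR.2.1]
      · rfl
    rw [hget, (hR.2.2 s hs0 hsN (F0+1) hRFs).2, hpar_xs p xr hI.1 hI.2.1]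


-- ---- semantics of a union write: parent[rv] := ru, xor[rv] := dd ----

theorem union_sem (N : Nat) (p xr : List Int) (hI : InvA N p xr) (ru rv dd : Int)
    (hru0 : 0 ≤ ru) (hruN : ru < (N:Int)) (hrv0 : 0 ≤ rv) (hrvN : rv < (N:Int))
    (hrur : pvGet p ru = ru) (hrvr : pvGet p rv = rv) (hne : ru ≠ rv) :
    ∀ (d : Nat) (i : Int), 0 ≤ i → i < (N:Int) → Reach p d i →
      (iterN p d i = rv →
        Reach (pvSet p rv ru) (d+1) i ∧ iterN (pvSet p rv ru) (d+1) i = ru ∧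
        parN (pvSet p rv ru) (pvSet xr rv dd) (d+1) i = Int.xor (parN p xr d i) dd) ∧
      (iterN p d i ≠ rv →
        Reach (pvSet p rv ru) d i ∧ iterN (pvSet p rv ru) d i = iterN p d i ∧
        parN (pvSet p rv ru) (pvSet xr rv dd) d i = parN p xr d i) := by
  obtain ⟨hpl, hxl, hvals, hzero⟩ := hI
  have hgp : ∀ j : Int, 0 ≤ j → j < (N:Int) →
      pvGet (pvSet p rv ru) j = if j = rv then ru else pvGet p j := by
    intro j h0 h2
    exact pvGet_pvSet p rv j ru hrv0 (by omega) h0 (by omega)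
  have hgx : ∀ j : Int, 0 ≤ j → j < (N:Int) →
      pvGet (pvSet xr rv dd) j = if j = rv then dd else pvGet xr j := by
    intro j h0 h2
    exact pvGet_pvSet xr rv j dd hrv0 (by omega) h0 (by omega)
  have hgpru : pvGet (pvSet p rv ru) ru = ru := by
    rw [hgp ru hru0 hruN, if_neg hne]; exact hrur
  have hgxru : pvGet (pvSet xr rv dd) ru = 0 := by
    rw [hgx ru hru0 hruN, if_neg hne]; exact hzero ru hru0 hruN hrur
  have hgprv : pvGet (pvSet p rv ru) rv = ru := by
    rw [hgp rv hrv0 hrvN, if_pos rfl]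
  have hgxrv : pvGet (pvSet xr rv dd) rv = dd := by
    rw [hgx rv hrv0 hrvN, if_pos rfl]
  have hxrv : pvGet xr rv = 0 := hzero rv hrv0 hrvN hrvr
  have hfixru : ∀ d : Nat, iterN (pvSet p rv ru) d ru = ru := iterN_fix _ hgpru
  have hzeru : ∀ d : Nat, parN (pvSet p rv ru) (pvSet xr rv dd) d ru = 0 :=
    parN_fix _ _ hgpru hgxru
  intro d
  induction d with
  | zero =>
      intro i h0 h2 hre
      have hroot : pvGet p i = i := hre
      constructor
      · intro hiv
        have hirv : i = rv := hiv
        rw [hirv]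
        refine ⟨?_, ?_, ?_⟩
        · show pvGet (pvSet p rv ru) (iterN (pvSet p rv ru) 1 rv) = iterN (pvSet p rv ru) 1 rv
          have h1 : iterN (pvSet p rv ru) 1 rv = ru := hgprv
          rw [h1]; exact hgpru
        · show iterN (pvSet p rv ru) 1 rv = ru
          exact hgprv
        · show Int.xor (pvGet (pvSet xr rv dd) rv) (pvGet (pvSet xr rv dd) (pvGet (pvSet p rv ru) rv)) = Int.xor (pvGet xr rv) dd
          rw [hgxrv, hgprv, hgxru, hxrv, intXor_zero, intZero_xor]
      · intro hiv
        have hirv : i ≠ rv := hiv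
        refine ⟨?_, rfl, ?_⟩
        · show pvGet (pvSet p rv ru) i = i
          rw [hgp i h0 h2, if_neg hirv]; exact hroot
        · show pvGet (pvSet xr rv dd) i = pvGet xr i
          rw [hgx i h0 h2, if_neg hirv]
  | succ d ih =>
      intro i h0 h2 hre
      by_cases hirv : i = rv
      · rw [hirv]
        have hfix : iterN p (d+1) rv = rv := iterN_fix p hrvr (d+1)
        constructor
        · intro _
          refine ⟨?_, ?_, ?_⟩
          · show pvGet (pvSet p rv ru) (iterN (pvSet p rv ru) (d+1+1) rv) = iterN (pvSet p rv ru) (d+1+1) rv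
            have h1 : iterN (pvSet p rv ru) (d+1+1) rv = ru := by
              rw [iterN_succ, hgprv]
              exact hfixru (d+1)
            rw [h1]; exact hgpru
          · show iterN (pvSet p rv ru) (d+1+1) rv = ru
            rw [iterN_succ, hgprv]
            exact hfixru (d+1)
          · rw [parN_succ, hgxrv, hgprv, hzeru (d+1), intXor_zero,
                parN_fix p xr hrvr hxrv, intZero_xor]
        · intro hcon
          exact absurd hfix hcon
      · have hm0 : 0 ≤ pvGet p i := (hvals i h0 h2).1
        have hmN : pvGet p i < (N:Int) := (hvals i h0 h2).2
        have hrem : Reach p d (pvGet p i) := hre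
        have hstep : pvGet (pvSet p rv ru) i = pvGet p i := by
          rw [hgp i h0 h2, if_neg hirv]
        have hxstep : pvGet (pvSet xr rv dd) i = pvGet xr i := by
          rw [hgx i h0 h2, if_neg hirv]
        have hIH := ih (pvGet p i) hm0 hmN hrem
        constructor
        · intro hiv
          have hmv : iterN p d (pvGet p i) = rv := hiv
          obtain ⟨hR2, hi2, hp2⟩ := hIH.1 hmv
          refine ⟨?_, ?_, ?_⟩
          · show Reach (pvSet p rv ru) (d+2) i
            unfold Reach
            rw [show (d+2) = (d+1)+1 from rfl, iterN_succ, hstep]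
            exact hR2
          · rw [show (d+2) = (d+1)+1 from rfl, iterN_succ, hstep, hi2]
          · rw [show (d+2) = (d+1)+1 from rfl, parN_succ, hstep, hxstep, hp2,
                parN_succ, ← intXor_assoc]
        · intro hiv
          have hmv : iterN p (d+1) i ≠ rv := hiv
          have hmv' : iterN p d (pvGet p i) ≠ rv := hmv
          obtain ⟨hR2, hi2, hp2⟩ := hIH.2 hmv'
          refine ⟨?_, ?_, ?_⟩
          · show Reach (pvSet p rv ru) (d+1) i
            unfold Reach
            rw [iterN_succ, hstep]
            exact hR2
          · rw [iterN_succ, hstep, hi2, iterN_succ]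
          · rw [parN_succ, hstep, hxstep, hp2, parN_succ]

-- ---- characterisation of B's relabelling pass ----

theorem relabel_go (ru rv dd : Int) (n : Int) :
    ∀ (k : Nat) (a : Int) (comp par : List Int), 0 ≤ a → a + (k:Int) = n →
      comp.length = n.toNat → par.length = n.toNat →
      ∀ res : List Int × List Int,
        (PySem.List.pyRange a n 1).foldl (unionStep ru rv dd) (comp, par) = res →
        res.1.length = n.toNat ∧ res.2.length = n.toNat ∧
        (∀ j : Int, 0 ≤ j → j < a →
          pvGet res.1 j = pvGet comp j ∧ pvGet res.2 j = pvGet par j) ∧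
        (∀ j : Int, a ≤ j → j < n →
          pvGet res.1 j = (if pvGet comp j = rv then ru else pvGet comp j) ∧
          pvGet res.2 j = (if pvGet comp j = rv then Int.xor (pvGet par j) dd
                           else pvGet par j)) := by
  intro k
  induction k with
  | zero =>
      intro a comp par ha hak hcl hql res hres
      rw [PySem.List.pyRange_one_eq_nil (by push_cast at hak; omega)] at hres
      simp only [List.foldl_nil] at hres
      subst hres
      refine ⟨hcl, hql, fun j h0 h2 => ⟨rfl, rfl⟩, ?_⟩
      intro j h1 h2
      exact absurd h2 (by push_cast at hak; omega)
  | succ k ih =>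
      intro a comp par ha hak hcl hql res hres
      have hn0 : 0 ≤ n := by push_cast at hak; omega
      have hlt : a < n := by push_cast at hak; omega
      have hclI : (comp.length : Int) = n := by rw [hcl]; omega
      have hqlI : (par.length : Int) = n := by rw [hql]; omega
      rw [PySem.List.pyRange_one_cons hlt, List.foldl_cons] at hres
      by_cases hca : pvGet comp a = rv
      · have hst : unionStep ru rv dd (comp, par) a =
            (pvSet comp a ru, pvSet par a (Int.xor (pvGet par a) dd)) := by
          unfold unionStep
          rw [if_pos hca]
        rw [hst] at hres
        have hcl1 : (pvSet comp a ru).length = n.toNat := by rw [length_pvSet, hcl]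
        have hql1 : (pvSet par a (Int.xor (pvGet par a) dd)).length = n.toNat := by
          rw [length_pvSet, hql]
        obtain ⟨L1, L2, Hlow, Hhigh⟩ := ih (a+1) _ _ (by omega)
          (by push_cast at hak ⊢; omega) hcl1 hql1 res hres
        have hgc : ∀ j : Int, 0 ≤ j → j < n →
            pvGet (pvSet comp a ru) j = if j = a then ru else pvGet comp j := by
          intro j h0 h2
          exact pvGet_pvSet comp a j ru ha (by omega) h0 (by omega)
        have hgq : ∀ j : Int, 0 ≤ j → j < n →
            pvGet (pvSet par a (Int.xor (pvGet par a) dd)) j =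
              if j = a then Int.xor (pvGet par a) dd else pvGet par j := by
          intro j h0 h2
          exact pvGet_pvSet par a j _ ha (by omega) h0 (by omega)
        refine ⟨L1, L2, ?_, ?_⟩
        · intro j h0 h2
          obtain ⟨e1, e2⟩ := Hlow j h0 (by omega)
          constructor
          · rw [e1, hgc j h0 (by omega), if_neg (by omega)]
          · rw [e2, hgq j h0 (by omega), if_neg (by omega)]
        · intro j h1 h2
          by_cases hja : j = a
          · subst hja
            obtain ⟨e1, e2⟩ := Hlow j ha (by omega)
            constructor
            · rw [e1, hgc j ha h2, if_pos rfl, if_pos hca]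
            · rw [e2, hgq j ha h2, if_pos rfl, if_pos hca]
          · obtain ⟨e1, e2⟩ := Hhigh j (by omega) h2
            have hcj : pvGet (pvSet comp a ru) j = pvGet comp j := by
              rw [hgc j (by omega) h2, if_neg hja]
            have hqj : pvGet (pvSet par a (Int.xor (pvGet par a) dd)) j = pvGet par j := by
              rw [hgq j (by omega) h2, if_neg hja]
            constructor
            · rw [e1, hcj]
            · rw [e2, hqj, hcj]
      · have hst : unionStep ru rv dd (comp, par) a = (comp, par) := by
          unfold unionStep
          rw [if_neg hca]
        rw [hst] at hres
        obtain ⟨L1, L2, Hlow, Hhigh⟩ := ih (a+1) comp par (by omega)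
          (by push_cast at hak ⊢; omega) hcl hql res hres
        refine ⟨L1, L2, ?_, ?_⟩
        · intro j h0 h2
          exact Hlow j h0 (by omega)
        · intro j h1 h2
          by_cases hja : j = a
          · subst hja
            obtain ⟨e1, e2⟩ := Hlow j ha (by omega)
            exact ⟨by rw [e1, if_neg hca], by rw [e2, if_neg hca]⟩
          · exact Hhigh j (by omega) h2

-- a cell whose parent is a root keeps its value through a find, wrapping negatives
theorem keep_cell (N : Nat) (p1 x1 p2 x2 : List Int)
    (hI1 : InvA N p1 x1) (hI2 : InvA N p2 x2)
    (hdir2 : ∀ j : Int, 0 ≤ j → j < (N:Int) → pvGet p1 (pvGet p1 j) = pvGet p1 j →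
        pvGet p2 j = pvGet p1 j ∧ pvGet x2 j = pvGet x1 j)
    (u : Int) (hu1 : -(N:Int) ≤ u) (hu2 : u < (N:Int))
    (hcond : pvGet p1 (pvGet p1 u) = pvGet p1 u) :
    pvGet p2 u = pvGet p1 u ∧ pvGet x2 u = pvGet x1 u := by
  by_cases hu0 : 0 ≤ u
  · exact hdir2 u hu0 hu2 hcond
  · have hw1 : pvGet p1 u = pvGet p1 (u + N) := by
      rw [pvGet_wrap p1 u (by rw [hI1.1]; omega) (by omega), hI1.1]
    have hw1x : pvGet x1 u = pvGet x1 (u + N) := by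
      rw [pvGet_wrap x1 u (by rw [hI1.2.1]; omega) (by omega), hI1.2.1]
    have hw2 : pvGet p2 u = pvGet p2 (u + N) := by
      rw [pvGet_wrap p2 u (by rw [hI2.1]; omega) (by omega), hI2.1]
    have hw2x : pvGet x2 u = pvGet x2 (u + N) := by
      rw [pvGet_wrap x2 u (by rw [hI2.2.1]; omega) (by omega), hI2.2.1]
    have hcond' : pvGet p1 (pvGet p1 (u + N)) = pvGet p1 (u + N) := by
      rw [← hw1]
      exact hcond
    have h := hdir2 (u + N) (by omega) (by omega) hcond'
    exact ⟨by rw [hw2, h.1, ← hw1], by rw [hw2x, h.2, ← hw1x]⟩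

theorem root_range (N c F : Nat) (p xr : List Int) (hI : InvA N p xr) (_hD : DepthLe N p c)
    (hcF : c + 1 ≤ F) (x : Int) (hx1 : -(N:Int) ≤ x) (hx2 : x < (N:Int)) :
    0 ≤ iterN p F x ∧ iterN p F x < (N:Int) := by
  by_cases hx0 : 0 ≤ x
  · exact iter_range N p xr hI F x hx0 hx2
  · obtain ⟨F0, rfl⟩ : ∃ F0, F = F0 + 1 := ⟨F - 1, by omega⟩
    have hw := iterN_wrap p x (by rw [hI.1]; omega) (by omega) F0
    rw [hI.1] at hw
    rw [hw]
    exact iter_range N p xr hI (F0+1) (x + N) (by omega) (by omega)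

-- ---- one edge: A's step and B's step advance the counter identically and preserve
-- the simulation ----

theorem step_sim (F N : Nat) (n : Int) (hn : (N:Int) = n)
    (e : List Int) (p xr rank comp par : List Int) (c : Nat)
    (he : preEdge n e = true)
    (hI : InvA N p xr) (hR : RelB N p xr comp par) (hD : DepthLe N p c)
    (hcF : c + 1 ≤ F) :
    ∃ p' xr' rank' comp' par' inc,
      (∀ a : Int, stepA F (p, rank, xr, a) e = (p', rank', xr', a + inc)) ∧
      (∀ b : Int, stepB n (comp, par, rank, b) e = (comp', par', rank', b + inc)) ∧
      InvA N p' xr' ∧ RelB N p' xr' comp' par' ∧ DepthLe N p' (c+1) := by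
  match e with
  | [] => simp [preEdge] at he
  | [_] => simp [preEdge] at he
  | [_, _] => simp [preEdge] at he
  | _ :: _ :: _ :: _ :: _ => simp [preEdge] at he
  | [u, v, w] =>
    simp only [preEdge, Bool.and_eq_true, decide_eq_true_eq] at he
    obtain ⟨⟨⟨hu1, hu2⟩, hv1⟩, hv2⟩ := he
    have hu1' : -(N:Int) ≤ u := by omega
    have hu2' : u < (N:Int) := by omega
    have hv1' : -(N:Int) ≤ v := by omega
    have hv2' : v < (N:Int) := by omega
    have hid_pres : ∀ j : Int, 0 ≤ j → j < (N:Int) → ∀ d : Nat, Reach p d j →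
        ∃ d', d' ≤ d ∧ Reach p d' j ∧ iterN p d' j = iterN p d j ∧
          parN p xr d' j = parN p xr d j :=
      fun j _ _ d hd => ⟨d, le_refl _, hd, rfl, rfl⟩
    obtain ⟨hRFu1, _, _, hcompu, hparu, hRFu⟩ :=
      state_eval N c F p xr p xr comp par hI hI hid_pres hR hD hcF u hu1' hu2'
    rcases hfu : findA F p xr u with ⟨ru, p1, x1⟩
    obtain ⟨hru_eq, hI1, hpres1, hdir1, hun1, hp1u, hx1u⟩ :=
      find_sem N F p xr u hI hu1' hu2' hRFu ru p1 x1 hfu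
    obtain ⟨hRF1v, hitv_eq, hparv_eq, hcompv, hparv, hRFv⟩ :=
      state_eval N c F p xr p1 x1 comp par hI hI1 hpres1 hR hD hcF v hv1' hv2'
    rcases hfv : findA F p1 x1 v with ⟨rv, p2, x2⟩
    obtain ⟨hrv_eq, hI2, hpres2, hdir2, hun2, hp2v, hx2v⟩ :=
      find_sem N F p1 x1 v hI1 hv1' hv2' hRF1v rv p2 x2 hfv
    -- the two sides compute the same roots
    have hruB : pvGet comp u = ru := by rw [hcompu]; exact hru_eq.symm
    have hrvp : rv = iterN p F v := hrv_eq.trans hitv_eq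
    have hrvB : pvGet comp v = rv := by rw [hcompv]; exact hrvp.symm
    -- ranges and root facts
    have hru0N : 0 ≤ ru ∧ ru < (N:Int) := by
      rw [hru_eq]; exact root_range N c F p xr hI hD hcF u hu1' hu2'
    have hrv0N : 0 ≤ rv ∧ rv < (N:Int) := by
      rw [hrvp]; exact root_range N c F p xr hI hD hcF v hv1' hv2'
    have hrootp_ru : pvGet p ru = ru := by rw [hru_eq]; exact hRFu
    have hrootp1_ru : pvGet p1 ru = ru := by
      obtain ⟨d', hle, hRe, _, _⟩ := hpres1 ru hru0N.1 hru0N.2 0 hrootp_ru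
      have hd0 : d' = 0 := Nat.le_zero.mp hle
      subst hd0
      exact hRe
    have hrootp1_rv : pvGet p1 rv = rv := by rw [hrv_eq]; exact hRF1v
    have hrootp2_ru : pvGet p2 ru = ru := by
      obtain ⟨d', hle, hRe, _, _⟩ := hpres2 ru hru0N.1 hru0N.2 0 hrootp1_ru
      have hd0 : d' = 0 := Nat.le_zero.mp hle
      subst hd0
      exact hRe
    have hrootp2_rv : pvGet p2 rv = rv := by
      obtain ⟨d', hle, hRe, _, _⟩ := hpres2 rv hrv0N.1 hrv0N.2 0 hrootp1_rv
      have hd0 : d' = 0 := Nat.le_zero.mp hle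
      subst hd0
      exact hRe
    -- the two sides compute the same parities
    have hcondu : pvGet p1 (pvGet p1 u) = pvGet p1 u := by
      have h1 : pvGet p1 u = ru := by rw [hp1u]; exact hru_eq.symm
      rw [h1]
      exact hrootp1_ru
    have hkeep := keep_cell N p1 x1 p2 x2 hI1 hI2 hdir2 u hu1' hu2' hcondu
    have hpuval : pvGet x2 u = parN p xr F u := by rw [hkeep.2, hx1u]
    have hpvval : pvGet x2 v = parN p xr F v := by rw [hx2v, hparv_eq]
    -- composed preservation p → p2 and the derived invariants
    have hpres12 : ∀ j : Int, 0 ≤ j → j < (N:Int) → ∀ d : Nat, Reach p d j →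
        ∃ d', d' ≤ d ∧ Reach p2 d' j ∧ iterN p2 d' j = iterN p d j ∧
          parN p2 x2 d' j = parN p xr d j := by
      intro j h0 hN d hd
      obtain ⟨d1, hd1le, hd1R, hd1i, hd1p⟩ := hpres1 j h0 hN d hd
      obtain ⟨d2, hd2le, hd2R, hd2i, hd2p⟩ := hpres2 j h0 hN d1 hd1R
      exact ⟨d2, le_trans hd2le hd1le, hd2R, by rw [hd2i, hd1i], by rw [hd2p, hd1p]⟩
    have hD2 : DepthLe N p2 c := by
      intro j h0 hN
      obtain ⟨d', hle, hRe, _, _⟩ := hpres12 j h0 hN c (hD j h0 hN)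
      exact (reach_mono p2 hRe hle).2
    have hD2' : DepthLe N p2 (c+1) := by
      intro j h0 hN
      exact (reach_mono p2 (hD2 j h0 hN) (Nat.le_succ c)).2
    have hsem2 : ∀ j : Int, 0 ≤ j → j < (N:Int) →
        iterN p2 c j = iterN p c j ∧ parN p2 x2 c j = parN p xr c j ∧ Reach p2 c j := by
      intro j h0 hN
      obtain ⟨d2, hd2le, hd2R, hd2i, hd2p⟩ := hpres12 j h0 hN c (hD j h0 hN)
      have hmon := reach_mono p2 hd2R hd2le
      have hroot2 : pvGet p2 (iterN p2 d2 j) = iterN p2 d2 j := hd2R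
      have hrr : 0 ≤ iterN p c j ∧ iterN p c j < (N:Int) :=
        iter_range N p xr hI c j h0 hN
      have hz2 : pvGet x2 (iterN p2 d2 j) = 0 := by
        rw [hd2i]
        exact hI2.2.2.2 _ hrr.1 hrr.2 (by rw [← hd2i]; exact hd2R)
      refine ⟨by rw [hmon.1, hd2i], ?_, hmon.2⟩
      rw [parN_mono p2 x2 hd2R hz2 hd2le, hd2p]
    have hR2 : RelB N p2 x2 comp par := by
      apply rel_of_exists N p2 x2 comp par hI2 hR.1 hR.2.1
      intro j h0 hN
      obtain ⟨hi2, hp2, hre2⟩ := hsem2 j h0 hN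
      obtain ⟨hcj, hpj⟩ := hR.2.2 j h0 hN c (hD j h0 hN)
      exact ⟨c, hre2, by rw [hcj, hi2], by rw [hpj, hp2]⟩
    by_cases hrr : ru = rv
    · -- same component: nothing merged, counter moves by 1 or 0 on both sides
      by_cases hw : Int.xor (parN p xr F u) (parN p xr F v) = w
      · refine ⟨p2, x2, rank, comp, par, 1, ?_, ?_, hI2, hR2, hD2'⟩
        · intro a
          simp only [stepA, hfu, hfv]
          rw [hpuval, hpvval, if_pos hrr, if_pos hw]
        · intro b
          simp only [stepB]
          rw [hruB, hrvB, hparu, hparv, if_pos hrr, if_pos hw]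
      · refine ⟨p2, x2, rank, comp, par, 0, ?_, ?_, hI2, hR2, hD2'⟩
        · intro a
          simp only [stepA, hfu, hfv]
          rw [hpuval, hpvval, if_pos hrr, if_neg hw]
          simp
        · intro b
          simp only [stepB]
          rw [hruB, hrvB, hparu, hparv, if_pos hrr, if_neg hw]
          simp
    · -- union: A hangs one root below the other, B relabels the absorbed class
      rcases hsw : (if pvGet rank ru < pvGet rank rv then (rv, ru) else (ru, rv)) with ⟨ru', rv'⟩
      have hswA : (if pvGet rank ru < pvGet rank rv
            then (rv, ru, parN p xr F v, parN p xr F u)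
            else (ru, rv, parN p xr F u, parN p xr F v)) =
          (ru', rv',
            (if pvGet rank ru < pvGet rank rv then parN p xr F v else parN p xr F u),
            (if pvGet rank ru < pvGet rank rv then parN p xr F u else parN p xr F v)) := by
        by_cases h : pvGet rank ru < pvGet rank rv
        · rw [if_pos h] at hsw
          injection hsw with e1 e2
          subst e1; subst e2
          simp [h]
        · rw [if_neg h] at hsw
          injection hsw with e1 e2
          subst e1; subst e2
          simp [h]
      have hxorvals : Int.xor (Int.xor
            (if pvGet rank ru < pvGet rank rv then parN p xr F v else parN p xr F u)
            (if pvGet rank ru < pvGet rank rv then parN p xr F u else parN p xr F v)) w =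
          Int.xor (Int.xor (parN p xr F u) (parN p xr F v)) w := by
        split_ifs with h
        · rw [intXor_comm (parN p xr F v)]
        · rfl
      have hmem : (ru' = ru ∧ rv' = rv) ∨ (ru' = rv ∧ rv' = ru) := by
        by_cases h : pvGet rank ru < pvGet rank rv
        · rw [if_pos h] at hsw
          injection hsw with e1 e2
          exact Or.inr ⟨e1.symm, e2.symm⟩
        · rw [if_neg h] at hsw
          injection hsw with e1 e2
          exact Or.inl ⟨e1.symm, e2.symm⟩
      have hru'0N : 0 ≤ ru' ∧ ru' < (N:Int) := by
        rcases hmem with ⟨h1, _⟩ | ⟨h1, _⟩ <;> rw [h1]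
        · exact hru0N
        · exact hrv0N
      have hrv'0N : 0 ≤ rv' ∧ rv' < (N:Int) := by
        rcases hmem with ⟨_, h2⟩ | ⟨_, h2⟩ <;> rw [h2]
        · exact hrv0N
        · exact hru0N
      have hroot_ru' : pvGet p2 ru' = ru' := by
        rcases hmem with ⟨h1, _⟩ | ⟨h1, _⟩ <;> rw [h1]
        · exact hrootp2_ru
        · exact hrootp2_rv
      have hroot_rv' : pvGet p2 rv' = rv' := by
        rcases hmem with ⟨_, h2⟩ | ⟨_, h2⟩ <;> rw [h2]
        · exact hrootp2_rv
        · exact hrootp2_ru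
      have hne' : ru' ≠ rv' := by
        rcases hmem with ⟨h1, h2⟩ | ⟨h1, h2⟩ <;> rw [h1, h2]
        · exact hrr
        · exact fun hcon => hrr hcon.symm
      set dd : Int := Int.xor (Int.xor (parN p xr F u) (parN p xr F v)) w with hdd_def
      -- B's relabelling pass
      rcases hfold : (PySem.List.pyRange 0 n 1).foldl (unionStep ru' rv' dd) (comp, par)
        with ⟨comp', par'⟩
      obtain ⟨hcl', hql', _, Hhigh⟩ := relabel_go ru' rv' dd n N 0 comp par (le_refl 0)
        (by omega) (by rw [hR.1]; omega) (by rw [hR.2.1]; omega) (comp', par') hfold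
      have hcl'' : comp'.length = N := by rw [hcl']; omega
      have hql'' : par'.length = N := by rw [hql']; omega
      have hHigh' : ∀ j : Int, 0 ≤ j → j < (N:Int) →
          pvGet comp' j = (if pvGet comp j = rv' then ru' else pvGet comp j) ∧
          pvGet par' j = (if pvGet comp j = rv' then Int.xor (pvGet par j) dd
                          else pvGet par j) := by
        intro j h0 hN
        exact Hhigh j h0 (by omega)
      -- A's two writes
      have hgp3 : ∀ j : Int, 0 ≤ j → j < (N:Int) →
          pvGet (pvSet p2 rv' ru') j = if j = rv' then ru' else pvGet p2 j := by
        intro j h0 hN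
        exact pvGet_pvSet p2 rv' j ru' hrv'0N.1 (by rw [hI2.1]; omega) h0 (by rw [hI2.1]; omega)
      have hgx3 : ∀ j : Int, 0 ≤ j → j < (N:Int) →
          pvGet (pvSet x2 rv' dd) j = if j = rv' then dd else pvGet x2 j := by
        intro j h0 hN
        exact pvGet_pvSet x2 rv' j dd hrv'0N.1 (by rw [hI2.2.1]; omega) h0 (by rw [hI2.2.1]; omega)
      have hI3 : InvA N (pvSet p2 rv' ru') (pvSet x2 rv' dd) := by
        refine ⟨by rw [length_pvSet, hI2.1], by rw [length_pvSet, hI2.2.1], ?_, ?_⟩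
        · intro j h0 hN
          rw [hgp3 j h0 hN]
          split
          · exact hru'0N
          · exact hI2.2.2.1 j h0 hN
        · intro j h0 hN hroot'
          rw [hgp3 j h0 hN] at hroot'
          by_cases hjrv : j = rv'
          · rw [if_pos hjrv] at hroot'
            exact absurd (hroot'.trans hjrv) hne'
          · rw [if_neg hjrv] at hroot'
            rw [hgx3 j h0 hN, if_neg hjrv]
            exact hI2.2.2.2 j h0 hN hroot'
      have hUS := union_sem N p2 x2 hI2 ru' rv' dd hru'0N.1 hru'0N.2 hrv'0N.1 hrv'0N.2
        hroot_ru' hroot_rv' hne'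
      have hR3 : RelB N (pvSet p2 rv' ru') (pvSet x2 rv' dd) comp' par' := by
        apply rel_of_exists N _ _ comp' par' hI3 hcl'' hql''
        intro j h0 hN
        obtain ⟨hi2, hp2c, hre2⟩ := hsem2 j h0 hN
        obtain ⟨hcj, hpj⟩ := hR.2.2 j h0 hN c (hD j h0 hN)
        obtain ⟨hc'j, hp'j⟩ := hHigh' j h0 hN
        by_cases hjv : iterN p2 c j = rv'
        · obtain ⟨hR3', hi3, hp3⟩ := (hUS c j h0 hN hre2).1 hjv
          have hcond : pvGet comp j = rv' := by rw [hcj, ← hi2]; exact hjv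
          refine ⟨c+1, hR3', ?_, ?_⟩
          · rw [hc'j, if_pos hcond, hi3]
          · rw [hp'j, if_pos hcond, hp3, hpj, hp2c]
        · obtain ⟨hR3', hi3, hp3⟩ := (hUS c j h0 hN hre2).2 hjv
          have hcond : ¬ pvGet comp j = rv' := by rw [hcj, ← hi2]; exact hjv
          refine ⟨c, (reach_mono _ hR3' (le_refl c)).2, ?_, ?_⟩
          · rw [hc'j, if_neg hcond, hi3, hi2, hcj]
          · rw [hp'j, if_neg hcond, hp3, hp2c, hpj]
      have hD3 : DepthLe N (pvSet p2 rv' ru') (c+1) := by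
        intro j h0 hN
        have hre2 := hD2 j h0 hN
        by_cases hjv : iterN p2 c j = rv'
        · exact ((hUS c j h0 hN hre2).1 hjv).1
        · exact (reach_mono _ ((hUS c j h0 hN hre2).2 hjv).1 (Nat.le_succ c)).2
      refine ⟨pvSet p2 rv' ru',
        pvSet x2 rv' dd,
        (if pvGet rank ru' = pvGet rank rv' then pvSet rank ru' (pvGet rank ru' + 1) else rank),
        comp', par', 1, ?_, ?_, hI3, hR3, hD3⟩
      · intro a
        simp only [stepA, hfu, hfv, hpuval, hpvval, hrr, hswA, hxorvals, ite_false]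
      · intro b
        simp only [stepB, hruB, hrvB, hparu, hparv, hrr, hsw, ← hdd_def, hfold, ite_false]

-- ---- the whole loop ----

theorem loop_sim (F N : Nat) (n : Int) (hn : (N:Int) = n) :
    ∀ (edges : List (List Int)) (p xr rank comp par : List Int) (c : Nat),
      edges.all (preEdge n) = true →
      InvA N p xr → RelB N p xr comp par → DepthLe N p c →
      c + edges.length ≤ F →
      ∀ a b : Int,
        (edges.foldl (stepA F) (p, rank, xr, a)).2.2.2 - a =
          (edges.foldl (stepB n) (comp, par, rank, b)).2.2.2 - b := by
  intro edges
  induction edges with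
  | nil => intros; simp
  | cons e t ih =>
      intro p xr rank comp par c hall hI hR hD hcF a b
      rw [List.all_cons, Bool.and_eq_true] at hall
      obtain ⟨p', xr', rank', comp', par', inc, hA, hB, hI', hR', hD'⟩ :=
        step_sim F N n hn e p xr rank comp par c hall.1 hI hR hD
          (by simp only [List.length_cons] at hcF; omega)
      rw [List.foldl_cons, hA a, List.foldl_cons, hB b]
      have hrec := ih p' xr' rank' comp' par' (c+1) hall.2 hI' hR' hD'
        (by simp only [List.length_cons] at hcF; omega) (a + inc) (b + inc)
      omega

-- ===== VERDICT (by name: the statement is the Claim_ definition above) =====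
theorem numberOfEdgesAdded_spec : Claim_equal_numberOfEdgesAdded := by
  unfold Claim_equal_numberOfEdgesAdded
  intro n edges _ hpre
  unfold Spec_numberOfEdgesAdded numberOfEdgesAdded numberOfEdgesAdded_alt
  unfold Pre_numberOfEdgesAdded at hpre
  cases edges with
  | nil => simp
  | cons e t =>
      have hpre' := hpre
      rw [List.all_cons, Bool.and_eq_true] at hpre'
      obtain ⟨u, v, w, rfl⟩ : ∃ u v w, e = [u, v, w] := by
        match e, hpre'.1 with
        | [u, v, w], _ => exact ⟨u, v, w, rfl⟩
        | [], hq => simp [preEdge] at hq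
        | [_], hq => simp [preEdge] at hq
        | [_, _], hq => simp [preEdge] at hq
        | _ :: _ :: _ :: _ :: _, hq => simp [preEdge] at hq
      have he := hpre'.1
      simp only [preEdge, Bool.and_eq_true, decide_eq_true_eq] at he
      have hn1 : 0 < n := by omega
      have hn : ((n.toNat : Nat) : Int) = n := Int.toNat_of_nonneg (by omega)
      have hp0len : (PySem.List.pyRange 0 n 1).length = n.toNat := by
        rw [PySem.List.length_pyRange_one]
        simp
      have hg0 : ∀ j : Int, 0 ≤ j → j < ((n.toNat : Nat) : Int) →
          pvGet (PySem.List.pyRange 0 n 1) j = j := by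
        intro j h0 h2
        exact pvGet_pyRange n j h0 (by omega)
      have hr0 : ∀ j : Int, 0 ≤ j → j < ((n.toNat : Nat) : Int) →
          pvGet (List.replicate n.toNat (0:Int)) j = 0 := by
        intro j h0 h2
        exact pvGet_replicate n.toNat j h0 h2
      have hI0 : InvA n.toNat (PySem.List.pyRange 0 n 1) (List.replicate n.toNat 0) := by
        refine ⟨hp0len, by simp, ?_, ?_⟩
        · intro j h0 h2
          rw [hg0 j h0 h2]
          exact ⟨h0, h2⟩
        · intro j h0 h2 _
          exact hr0 j h0 h2
      have hD0 : DepthLe n.toNat (PySem.List.pyRange 0 n 1) 0 := by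
        intro j h0 h2
        show pvGet _ (iterN _ 0 j) = iterN _ 0 j
        exact hg0 j h0 h2
      have hR0 : RelB n.toNat (PySem.List.pyRange 0 n 1) (List.replicate n.toNat 0)
          (PySem.List.pyRange 0 n 1) (List.replicate n.toNat 0) := by
        apply rel_of_exists _ _ _ _ _ hI0 hp0len (by simp)
        intro j h0 h2
        refine ⟨0, hD0 j h0 h2, ?_, ?_⟩
        · rw [iterN_zero]
          exact hg0 j h0 h2
        · rw [parN_zero]
      have hmain := loop_sim (n.toNat + ([u, v, w] :: t).length) n.toNat n hn
        ([u, v, w] :: t)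
        (PySem.List.pyRange 0 n 1) (List.replicate n.toNat 0) (List.replicate n.toNat 0)
        (PySem.List.pyRange 0 n 1) (List.replicate n.toNat 0) 0
        hpre hI0 hR0 hD0
        (by omega) 0 0
      omega
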